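-- pv_equiv track=rewrite | github.com/pralinkhaira/gfg-soln | Difficulty: Medium/ASCII Range Sum/ascii-range-sum.py | asciirange
-- ===== SOURCE A (Python) =====
-- from collections import defaultdict
--
-- def asciirange(s: str):
--     dic = defaultdict(list)
--     prefix = [0] * (len(s) + 1)
--
--     for i, ch in enumerate(s):
--         dic[ch].append(i)
--         prefix[i + 1] = prefix[i] + ord(ch)
--
--     ans = [
--         prefix[j[-1]] - prefix[j[0] + 1]
--         for j in dic.values()
--         if len(j) > 1 and prefix[j[-1]] - prefix[j[0] + 1] != 0
--     ]
--     return sorted(ans)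
-- ===== SOURCE B (Python) =====
-- def asciirange(s: str):
--     ans = []
--     for ch in dict.fromkeys(s):
--         first = s.find(ch)
--         last = s.rfind(ch)
--         if first != last:
--             val = sum(ord(c) for c in s[first + 1:last])
--             if val != 0:
--                 ans.append(val)
--     return sorted(ans)
-- ===== Notes on version B (the rewrite author's own statement) =====
-- stated objective: simpler
-- what changed: Replaces A's prefix-sum array and per-character index-list dictionary with a direct scan over the distinct characters using find/rfind and summing the ASCII codes of the slice between first and last occurrence.
import Mathlib
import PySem

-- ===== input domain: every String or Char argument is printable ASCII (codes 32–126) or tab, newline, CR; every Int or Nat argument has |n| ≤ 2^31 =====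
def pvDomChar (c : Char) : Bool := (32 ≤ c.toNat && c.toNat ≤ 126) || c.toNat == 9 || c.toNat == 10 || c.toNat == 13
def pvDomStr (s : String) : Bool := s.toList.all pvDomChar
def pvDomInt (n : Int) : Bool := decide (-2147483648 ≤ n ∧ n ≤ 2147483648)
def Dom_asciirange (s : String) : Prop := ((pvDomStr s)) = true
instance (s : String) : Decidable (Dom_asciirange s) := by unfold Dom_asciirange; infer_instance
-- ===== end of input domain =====

-- B replaces A's prefix-sum array and per-character index-list dictionary by a direct
-- find/rfind scan per distinct character (objective: simpler; not claimed faster).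


-- ===== PORT A =====
def asciirange (s : String) : List Int :=
  let cs := s.toList
  -- for i, ch in enumerate(s): dic[ch].append(i); prefix[i+1] = prefix[i] + ord(ch)
  let st := (PySem.List.enumerate cs 0).foldl
    (fun (st : PySem.Dict Char (List Int) × List Int) p =>
      (st.1.modify p.2 [] (fun l => l ++ [p.1]),
       PySem.List.pySetD st.2 (p.1 + 1) (PySem.List.pyGetD st.2 p.1 0 + (p.2.toNat : Int))))
    (PySem.Dict.empty, List.replicate (cs.length + 1) 0)
  let ans := (PySem.Dict.values st.1).foldl
    (fun ans j =>
      if j.length > 1 ∧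
          PySem.List.pyGetD st.2 (PySem.List.pyGetD j (-1) 0) 0
            - PySem.List.pyGetD st.2 (PySem.List.pyGetD j 0 0 + 1) 0 ≠ 0 then
        ans ++ [PySem.List.pyGetD st.2 (PySem.List.pyGetD j (-1) 0) 0
            - PySem.List.pyGetD st.2 (PySem.List.pyGetD j 0 0 + 1) 0]
      else ans) []
  PySem.List.sorted ans (fun x => x)

-- ===== PORT B =====
def asciirange_alt (s : String) : List Int :=
  let cs := s.toList
  let ans := (PySem.List.dedup cs).foldl (fun ans ch =>
    let first := cs.idxOf ch                            -- s.find(ch): ch occurs, so first index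
    let last := cs.length - 1 - cs.reverse.idxOf ch     -- s.rfind(ch): last index
    if first ≠ last then
      let val := ((PySem.List.slice cs (some ((first : Int) + 1)) (some (last : Int))).map
                    (fun c => (c.toNat : Int))).sum
      if val ≠ 0 then ans ++ [val] else ans
    else ans) []
  PySem.List.sorted ans (fun x => x)

-- ===== PRECONDITION & SPEC =====
def Spec_asciirange (s : String) (out : List Int) : Prop := out = asciirange_alt s
instance (s : String) (out : List Int) : Decidable (Spec_asciirange s out) := by unfold Spec_asciirange; infer_instance

-- ===== CLAIM (what is proved, stated in full; the proofs are below) =====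
def Claim_equal_asciirange : Prop := ∀ (s : String), Dom_asciirange s → Spec_asciirange s (asciirange s)

-- ===== LEMMAS AND PROOFS =====

-- sum of ASCII codes
def ordsum (cs : List Char) : Int := (cs.map (fun c => (c.toNat : Int))).sum

-- occurrence positions of c in cs, offset k
def occ (cs : List Char) (k : Int) (c : Char) : List Int :=
  match cs with
  | [] => []
  | a :: t => (if a = c then [k] else []) ++ occ t (k + 1) c

theorem occ_append (ys : List Char) (x : Char) (k : Int) (c : Char) :
    occ (ys ++ [x]) k c = occ ys k c ++ (if x = c then [k + ys.length] else []) := by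
  induction ys generalizing k with
  | nil => simp [occ]
  | cons a t ih => simp [occ, ih (k + 1)]; ring_nf

theorem occ_eq_nil_of_not_mem (cs : List Char) (k : Int) (c : Char) (h : c ∉ cs) :
    occ cs k c = [] := by
  induction cs generalizing k with
  | nil => rfl
  | cons a t ih =>
    simp only [List.mem_cons, not_or] at h
    simp [occ, Ne.symm h.1, ih _ h.2]

theorem occ_length (cs : List Char) (k : Int) (c : Char) :
    (occ cs k c).length = cs.count c := by
  induction cs generalizing k with
  | nil => rfl
  | cons a t ih =>
    by_cases h : a = c <;> simp [occ, h, ih (k + 1)]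

theorem occ_head (cs : List Char) (k : Int) (c : Char) (h : c ∈ cs) :
    (occ cs k c).getD 0 0 = k + (cs.idxOf c : Int) := by
  induction cs generalizing k with
  | nil => simp at h
  | cons a t ih =>
    by_cases hac : a = c
    · simp [occ, hac, List.idxOf_cons_self]
    · have hct : c ∈ t := by simpa [Ne.symm hac] using h
      simp only [occ, if_neg hac, List.nil_append]
      rw [ih (k + 1) hct]
      have : (a :: t).idxOf c = t.idxOf c + 1 := by
        simp [hac]
      rw [this]; push_cast; ring

theorem occ_getLast? (cs : List Char) (k : Int) (c : Char) (h : c ∈ cs) :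
    (occ cs k c).getLast? = some (k + ((cs.length - 1 - cs.reverse.idxOf c : Nat) : Int)) := by
  induction cs using List.reverseRecOn generalizing k with
  | nil => simp at h
  | append_singleton ys x ih =>
    by_cases hxc : x = c
    · subst hxc
      rw [occ_append, if_pos rfl, List.getLast?_concat]
      have hr : (ys ++ [x]).length - 1 - (ys ++ [x]).reverse.idxOf x = ys.length := by
        simp [List.reverse_append, List.idxOf_cons_self]
      rw [hr]
    · have hcy : c ∈ ys := by simpa [Ne.symm hxc] using h
      rw [occ_append]
      simp only [if_neg hxc, List.append_nil]
      rw [ih k hcy]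
      congr 2
      have h1 : (ys ++ [x]).reverse = x :: ys.reverse := by simp
      have h2 : ys.reverse.idxOf c < ys.length := by
        simpa using List.idxOf_lt_length_of_mem (by simpa using hcy : c ∈ ys.reverse)
      rw [h1]
      simp [hxc]
      omega

theorem occ_ne_nil (cs : List Char) (k : Int) (c : Char) (h : c ∈ cs) : occ cs k c ≠ [] := by
  intro hnil
  have := occ_length cs k c
  rw [hnil] at this
  simp [eq_comm, List.count_eq_zero] at this
  exact this h

theorem occ_lb (cs : List Char) (k : Int) (c : Char) : ∀ x ∈ occ cs k c, k ≤ x := by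
  induction cs generalizing k with
  | nil => simp [occ]
  | cons a t ih =>
    intro x hx
    simp only [occ, List.mem_append] at hx
    rcases hx with hx | hx
    · split at hx <;> simp_all
    · have := ih (k + 1) x hx; omega

theorem occ_pairwise (cs : List Char) (k : Int) (c : Char) :
    (occ cs k c).Pairwise (· < ·) := by
  induction cs generalizing k with
  | nil => simp [occ]
  | cons a t ih =>
    by_cases h : a = c
    · simp only [occ, if_pos h, List.singleton_append, List.pairwise_cons]
      exact ⟨fun x hx => by have := occ_lb t (k + 1) c x hx; omega, ih (k + 1)⟩
    · simpa [occ, h] using ih (k + 1)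

-- first occurrence ≤ last occurrence, strict iff count > 1
theorem idxOf_le_last (cs : List Char) (c : Char) (h : c ∈ cs) :
    cs.idxOf c ≤ cs.length - 1 - cs.reverse.idxOf c ∧
      (1 < cs.count c ↔ cs.idxOf c < cs.length - 1 - cs.reverse.idxOf c) := by
  have hne := occ_ne_nil cs 0 c h
  have hh := occ_head cs 0 c h
  have hl := occ_getLast? cs 0 c h
  have hlen := occ_length cs 0 c
  have hpw := occ_pairwise cs 0 c
  obtain ⟨a, t, hat⟩ := List.exists_cons_of_ne_nil hne
  rw [hat] at hh hl hlen hpw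
  simp only [List.getD_cons_zero] at hh
  rcases t.eq_nil_or_concat with rfl | ⟨t', x, rfl⟩
  · simp only [List.getLast?_singleton, Option.some_inj] at hl
    simp only [List.length_cons, List.length_nil] at hlen
    refine ⟨by omega, ?_⟩
    constructor <;> intro h' <;> omega
  · simp only [List.concat_eq_append] at hl hlen hpw
    have hlast : (a :: (t' ++ [x])).getLast? = some x := by
      rw [show a :: (t' ++ [x]) = (a :: t') ++ [x] by simp, List.getLast?_concat]
    rw [hlast, Option.some_inj] at hl
    have hax : a < x := (List.pairwise_cons.mp hpw).1 x (by simp)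
    have hlen2 : 1 < cs.count c := by
      rw [← hlen]; simp only [List.length_cons, List.length_append, List.length_cons, List.length_nil]; omega
    exact ⟨by omega, ⟨fun _ => by omega, fun _ => hlen2⟩⟩

-- the prefix-array fold of A
def preStep (pre : List Int) (p : Int × Char) : List Int :=
  PySem.List.pySetD pre (p.1 + 1) (PySem.List.pyGetD pre p.1 0 + (p.2.toNat : Int))

theorem pre_fold (l : List Char) (k : Nat) (pre : List Int) (hlen : k + l.length < pre.length) :
    ((PySem.List.enumerate l k).foldl preStep pre).length = pre.length ∧
    ∀ t : Nat, t ≤ k + l.length →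
      ((PySem.List.enumerate l k).foldl preStep pre).getD t 0 =
        if t ≤ k then pre.getD t 0 else pre.getD k 0 + ordsum (l.take (t - k)) := by
  induction l generalizing k pre with
  | nil =>
    refine ⟨rfl, fun t ht => ?_⟩
    simp only [List.length_nil] at ht
    simp only [PySem.List.enumerate, List.foldl_nil]
    rw [if_pos (by omega)]
  | cons ch rest ih =>
    have hcons : PySem.List.enumerate (ch :: rest) (k : Int) =
        ((k : Int), ch) :: PySem.List.enumerate rest ((k : Int) + 1) := rfl
    have hcast : ((k : Int) + 1) = (((k + 1 : Nat)) : Int) := by push_cast; ring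
    set v : Int := pre.getD k 0 + (ch.toNat : Int) with hv
    have hstep : preStep pre ((k : Int), ch) = pre.set (k + 1) v := by
      unfold preStep
      rw [PySem.List.pyGetD_natCast, hcast, PySem.List.pySetD_natCast, hv]
    have hlen1 : (pre.set (k + 1) v).length = pre.length := by simp
    have ihre := ih (k + 1) (pre.set (k + 1) v)
      (by rw [hlen1]; simp only [List.length_cons] at hlen; omega)
    rw [hcons]
    simp only [List.foldl_cons, hstep, hcast]
    refine ⟨by rw [ihre.1, hlen1], fun t ht => ?_⟩
    rw [ihre.2 t (by simp only [List.length_cons] at ht; omega)]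
    by_cases h1 : t ≤ k
    · rw [if_pos (by omega), if_pos h1]
      rw [List.getD_eq_getElem?_getD, List.getD_eq_getElem?_getD,
        List.getElem?_set_ne (by omega)]
    · rw [if_neg h1]
      have hset : (pre.set (k + 1) v).getD (k + 1) 0 = v := by
        rw [List.getD_eq_getElem?_getD, List.getElem?_set_self (by omega)]
        rfl
      by_cases h2 : t ≤ k + 1
      · have : t = k + 1 := by omega
        subst this
        rw [if_pos (le_refl _), hset]
        simp [ordsum, hv, List.getD_eq_getElem?_getD]
      · rw [if_neg (by omega), hset]
        have : t - k = (t - (k + 1)) + 1 := by omega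
        rw [this]
        simp [ordsum, List.take_succ_cons, hv]
        ring

-- the dictionary fold of A
def dicStep (d : PySem.Dict Char (List Int)) (p : Int × Char) : PySem.Dict Char (List Int) :=
  d.modify p.2 [] (fun l => l ++ [p.1])

theorem dic_fold (cs : List Char) :
    ((PySem.List.enumerate cs 0).foldl dicStep PySem.Dict.empty).items =
      (PySem.List.dedup cs).map (fun c => (c, occ cs 0 c)) := by
  induction cs using List.reverseRecOn with
  | nil => rfl
  | append_singleton ys x ih =>
    have henum : PySem.List.enumerate (ys ++ [x]) 0 =
        PySem.List.enumerate ys 0 ++ [((ys.length : Int), x)] := by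
      rw [PySem.List.enumerate_append]; simp [PySem.List.enumerate]
    rw [henum, List.foldl_append, List.foldl_cons, List.foldl_nil]
    set d := (PySem.List.enumerate ys 0).foldl dicStep PySem.Dict.empty with hd
    have hkeys : d.keys = PySem.List.dedup ys := by
      show d.items.map Prod.fst = _
      rw [ih, List.map_map]; simp [Function.comp_def]
    have hnodup : d.keys.Nodup := by
      rw [hkeys, PySem.List.dedup_eq_ofList]; exact PySem.Set.nodup_ofList ys
    have hded : PySem.List.dedup (ys ++ [x]) = PySem.Set.add (PySem.List.dedup ys) x := by
      simp [PySem.Set.ofList_append_singleton]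
    have hoccap : ∀ c, occ (ys ++ [x]) 0 c =
        occ ys 0 c ++ (if x = c then [(ys.length : Int)] else []) := by
      intro c; rw [occ_append]; simp
    by_cases hx : x ∈ PySem.List.dedup ys
    · have hxys : x ∈ ys := by
        rw [PySem.List.dedup_eq_ofList] at hx; exact (PySem.Set.mem_ofList ys x).mp hx
      have hcont : d.contains x = true := by
        rw [PySem.Dict.contains_iff_mem_keys, hkeys]; exact hx
      have hget : d.getD x [] = occ ys 0 x := by
        rw [PySem.Dict.getD_eq_get?_getD,
          PySem.Dict.get?_of_mem_items d (by rw [ih]; exact List.mem_map_of_mem hx) hnodup]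
        rfl
      show (d.modify x [] (fun l => l ++ [(ys.length : Int)])).items = _
      rw [show d.modify x [] (fun l => l ++ [(ys.length : Int)]) =
          d.insert x (d.getD x [] ++ [(ys.length : Int)]) from rfl]
      rw [PySem.Dict.items_insert_of_contains d _ hcont, ih, hget, hded,
        PySem.Set.add_of_mem hx, List.map_map]
      apply List.map_congr_left
      intro c hcmem
      by_cases hcx : c = x
      · subst hcx
        simp [hoccap c]
      · simp [Function.comp, hcx, Ne.symm hcx, hoccap c]
    · have hxys : x ∉ ys := fun hmem => hx (by
        rw [PySem.List.dedup_eq_ofList]; exact (PySem.Set.mem_ofList ys x).mpr hmem)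
      have hcont : d.contains x = false := by
        rw [← Bool.not_eq_true, PySem.Dict.contains_iff_mem_keys, hkeys]; exact hx
      have hget : d.getD x [] = [] := PySem.Dict.getD_of_not_contains d [] hcont
      show (d.modify x [] (fun l => l ++ [(ys.length : Int)])).items = _
      rw [show d.modify x [] (fun l => l ++ [(ys.length : Int)]) =
          d.insert x (d.getD x [] ++ [(ys.length : Int)]) from rfl]
      rw [PySem.Dict.items_insert_of_not_contains d _ hcont, ih, hget, hded,
        PySem.Set.add_of_not_mem hx, List.map_append]
      congr 1
      · apply List.map_congr_left
        intro c hcmem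
        have hcx : x ≠ c := fun h => hx (h ▸ hcmem)
        simp [hoccap c, hcx]
      · simp [hoccap x, occ_eq_nil_of_not_mem ys 0 x hxys]

-- sum splits across the in-between slice
theorem ordsum_split (cs : List Char) (a b : Nat) (hab : a ≤ b) :
    ordsum (cs.take b) - ordsum (cs.take a) = ordsum ((cs.drop a).take (b - a)) := by
  have : cs.take b = cs.take a ++ (cs.drop a).take (b - a) := by
    rw [← List.take_add]
    congr 1
    omega
  rw [this]
  simp [ordsum]

-- the two independent accumulators of A's first loop, split
theorem foldA (E : List (Int × Char)) (d0 : PySem.Dict Char (List Int)) (p0 : List Int) :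
    E.foldl (fun (st : PySem.Dict Char (List Int) × List Int) p =>
      (st.1.modify p.2 [] (fun l => l ++ [p.1]),
       PySem.List.pySetD st.2 (p.1 + 1) (PySem.List.pyGetD st.2 p.1 0 + (p.2.toNat : Int)))) (d0, p0)
    = (E.foldl dicStep d0, E.foldl preStep p0) := by
  induction E generalizing d0 p0 with
  | nil => rfl
  | cons e t ih =>
    simp only [List.foldl_cons]
    exact ih _ _

-- per-character agreement of A's dictionary/prefix formulas with B's find/rfind/slice formulas
theorem perchar (cs : List Char) (r : List Int)
    (hr : ∀ t : Nat, t ≤ cs.length → r.getD t 0 = ordsum (cs.take t))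
    (c : Char) (hc : c ∈ cs) :
    ((occ cs 0 c).length > 1 ↔ cs.idxOf c ≠ cs.length - 1 - cs.reverse.idxOf c) ∧
    (cs.idxOf c ≠ cs.length - 1 - cs.reverse.idxOf c →
      PySem.List.pyGetD r (PySem.List.pyGetD (occ cs 0 c) (-1) 0) 0
          - PySem.List.pyGetD r (PySem.List.pyGetD (occ cs 0 c) 0 0 + 1) 0
        = ((PySem.List.slice cs (some ((cs.idxOf c : Int) + 1))
              (some ((cs.length - 1 - cs.reverse.idxOf c : Nat) : Int))).map
            (fun ch => (ch.toNat : Int))).sum) := by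
  have hne := occ_ne_nil cs 0 c hc
  have hfl := idxOf_le_last cs c hc
  have hflt : cs.idxOf c < cs.length := List.idxOf_lt_length_of_mem hc
  have hlast : cs.length - 1 - cs.reverse.idxOf c ≤ cs.length := by omega
  constructor
  · rw [occ_length]
    constructor
    · intro hgt
      have := hfl.2.mpr
      intro heq
      have := hfl.2.mp hgt
      omega
    · intro hne'
      exact hfl.2.mpr (by omega)
  · intro hne'
    have hlt : cs.idxOf c < cs.length - 1 - cs.reverse.idxOf c := by
      rcases lt_or_eq_of_le hfl.1 with h | h
      · exact h
      · exact absurd h hne'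
    -- first and last entries of the occurrence list
    have hhead : PySem.List.pyGetD (occ cs 0 c) 0 0 = (cs.idxOf c : Int) := by
      rw [PySem.List.pyGetD_zero, occ_head cs 0 c hc]
      simp
    have hlastv : PySem.List.pyGetD (occ cs 0 c) (-1) 0
        = ((cs.length - 1 - cs.reverse.idxOf c : Nat) : Int) := by
      rw [PySem.List.pyGetD_neg_one _ 0 hne]
      have h1 := occ_getLast? cs 0 c hc
      rw [List.getLast?_eq_some_getLast hne, Option.some_inj] at h1
      rw [h1]
      simp
    rw [hhead, hlastv]
    have h1 : PySem.List.pyGetD r (((cs.length - 1 - cs.reverse.idxOf c : Nat) : Int)) 0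
        = ordsum (cs.take (cs.length - 1 - cs.reverse.idxOf c)) := by
      rw [PySem.List.pyGetD_natCast]
      exact hr _ hlast
    have h2 : PySem.List.pyGetD r ((cs.idxOf c : Int) + 1) 0
        = ordsum (cs.take (cs.idxOf c + 1)) := by
      rw [show ((cs.idxOf c : Int) + 1) = ((cs.idxOf c + 1 : Nat) : Int) by push_cast; ring,
        PySem.List.pyGetD_natCast]
      exact hr _ (by omega)
    rw [h1, h2]
    rw [show ((cs.idxOf c : Int) + 1) = ((cs.idxOf c + 1 : Nat) : Int) by push_cast; ring,
      PySem.List.slice_natCast]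
    rw [ordsum_split cs (cs.idxOf c + 1) (cs.length - 1 - cs.reverse.idxOf c) (by omega)]
    rfl

theorem asciirange_spec : Claim_equal_asciirange := by
  intro s _
  unfold Spec_asciirange asciirange asciirange_alt
  dsimp only
  rw [foldA]
  dsimp only
  set cs := s.toList with hcs
  set r := (PySem.List.enumerate cs 0).foldl preStep (List.replicate (cs.length + 1) 0) with hrdef
  have hpre := pre_fold cs 0 (List.replicate (cs.length + 1) 0) (by simp)
  simp only [Nat.cast_zero, Nat.zero_add, Nat.sub_zero] at hpre
  have hr : ∀ t : Nat, t ≤ cs.length → r.getD t 0 = ordsum (cs.take t) := by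
    intro t ht
    rw [hrdef, hpre.2 t (by omega)]
    rcases Nat.eq_zero_or_pos t with rfl | htp
    · simp [ordsum]
    · rw [if_neg (by omega)]
      simp
  have hvals : ((PySem.List.enumerate cs 0).foldl dicStep PySem.Dict.empty).values
      = (PySem.List.dedup cs).map (fun c => occ cs 0 c) := by
    show ((PySem.List.enumerate cs 0).foldl dicStep PySem.Dict.empty).items.map Prod.snd = _
    rw [dic_fold, List.map_map]
    rfl
  rw [hvals]
  rw [PySem.List.foldl_append_ite
    (p := fun j : List Int => j.length > 1 ∧
      PySem.List.pyGetD r (PySem.List.pyGetD j (-1) 0) 0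
        - PySem.List.pyGetD r (PySem.List.pyGetD j 0 0 + 1) 0 ≠ 0)
    (f := fun j : List Int => PySem.List.pyGetD r (PySem.List.pyGetD j (-1) 0) 0
        - PySem.List.pyGetD r (PySem.List.pyGetD j 0 0 + 1) 0)]
  have hB : (PySem.List.dedup cs).foldl (fun ans ch =>
      if cs.idxOf ch ≠ cs.length - 1 - cs.reverse.idxOf ch then
        if ((PySem.List.slice cs (some ((cs.idxOf ch : Int) + 1))
              (some ((cs.length - 1 - cs.reverse.idxOf ch : Nat) : Int))).map
            (fun c => (c.toNat : Int))).sum ≠ 0 then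
          ans ++ [((PySem.List.slice cs (some ((cs.idxOf ch : Int) + 1))
              (some ((cs.length - 1 - cs.reverse.idxOf ch : Nat) : Int))).map
            (fun c => (c.toNat : Int))).sum]
        else ans
      else ans) []
      = (PySem.List.dedup cs).foldl (fun ans ch =>
      if cs.idxOf ch ≠ cs.length - 1 - cs.reverse.idxOf ch ∧
          ((PySem.List.slice cs (some ((cs.idxOf ch : Int) + 1))
              (some ((cs.length - 1 - cs.reverse.idxOf ch : Nat) : Int))).map
            (fun c => (c.toNat : Int))).sum ≠ 0 then
          ans ++ [((PySem.List.slice cs (some ((cs.idxOf ch : Int) + 1))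
              (some ((cs.length - 1 - cs.reverse.idxOf ch : Nat) : Int))).map
            (fun c => (c.toNat : Int))).sum]
        else ans) [] := by
    apply PySem.List.foldl_congr_mem
    intro acc x hx
    split_ifs <;> first | rfl | tauto
  rw [hB]
  rw [PySem.List.foldl_append_ite
    (p := fun ch => cs.idxOf ch ≠ cs.length - 1 - cs.reverse.idxOf ch ∧
          ((PySem.List.slice cs (some ((cs.idxOf ch : Int) + 1))
              (some ((cs.length - 1 - cs.reverse.idxOf ch : Nat) : Int))).map
            (fun c => (c.toNat : Int))).sum ≠ 0)
    (f := fun ch => ((PySem.List.slice cs (some ((cs.idxOf ch : Int) + 1))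
              (some ((cs.length - 1 - cs.reverse.idxOf ch : Nat) : Int))).map
            (fun c => (c.toNat : Int))).sum)]
  simp only [List.nil_append]
  congr 1
  rw [List.filter_map, List.map_map]
  simp only [Function.comp_def]
  have hfilter : ∀ c ∈ PySem.List.dedup cs,
      decide ((occ cs 0 c).length > 1 ∧
        PySem.List.pyGetD r (PySem.List.pyGetD (occ cs 0 c) (-1) 0) 0
          - PySem.List.pyGetD r (PySem.List.pyGetD (occ cs 0 c) 0 0 + 1) 0 ≠ 0)
      = decide (cs.idxOf c ≠ cs.length - 1 - cs.reverse.idxOf c ∧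
          ((PySem.List.slice cs (some ((cs.idxOf c : Int) + 1))
              (some ((cs.length - 1 - cs.reverse.idxOf c : Nat) : Int))).map
            (fun ch => (ch.toNat : Int))).sum ≠ 0) := by
    intro c hcd
    have hc : c ∈ cs := by
      rw [PySem.List.dedup_eq_ofList] at hcd
      exact (PySem.Set.mem_ofList cs c).mp hcd
    have hp := perchar cs r hr c hc
    by_cases hfl : cs.idxOf c ≠ cs.length - 1 - cs.reverse.idxOf c
    · simp only [decide_eq_decide]
      rw [hp.2 hfl]
      constructor
      · rintro ⟨-, h2⟩; exact ⟨hfl, h2⟩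
      · rintro ⟨-, h2⟩; exact ⟨hp.1.mpr hfl, h2⟩
    · simp only [decide_eq_decide]
      constructor
      · rintro ⟨h1, -⟩; exact absurd (hp.1.mp h1) hfl
      · rintro ⟨h1, -⟩; exact absurd h1 hfl
  rw [List.filter_congr hfilter]
  apply List.map_congr_left
  intro c hcf
  rw [List.mem_filter] at hcf
  have hc : c ∈ cs := by
    have := hcf.1
    rw [PySem.List.dedup_eq_ofList] at this
    exact (PySem.Set.mem_ofList cs c).mp this
  have hfl : cs.idxOf c ≠ cs.length - 1 - cs.reverse.idxOf c := by
    have := of_decide_eq_true hcf.2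
    exact this.1
  exact (perchar cs r hr c hc).2 hfl
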